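-- pv_equiv track=rewrite | github.com/asabou/wifi-analyzer | utils/analyzer_utils.py | convert_bytes_to_readable_ipv4_address
-- ===== SOURCE A (Python) =====
-- def get_bytes_in_pretty_format(bytes, sep):
--     return sep.join("%02x" % b for b in bytes).upper()
--
-- def convert_bytes_to_readable_ipv4_address(bytes):
--     bytes_string_array = get_bytes_in_pretty_format(bytes, ":").split(":")
--     ip = []
--     for byte_string in bytes_string_array:
--         p = 0
--         decimal = 0
--         for i in range(len(byte_string) - 1, -1, -1):
--             decimal = decimal + map_base_16[byte_string[i]] * pow(16, p)
--             p = p + 1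
--         ip.append(decimal)
--     return ".".join(str(x) for x in ip)
--
-- map_base_16 = {
--     "0": 0,
--     "1": 1,
--     "2": 2,
--     "3": 3,
--     "4": 4,
--     "5": 5,
--     "6": 6,
--     "7": 7,
--     "8": 8,
--     "9": 9,
--     "A": 10,
--     "B": 11,
--     "C": 12,
--     "D": 13,
--     "E": 14,
--     "F": 15
-- }
-- ===== SOURCE B (Python) =====
-- def convert_bytes_to_readable_ipv4_address(bytes):
--     return ".".join(str(b) for b in bytes)
-- ===== Notes on version B (the rewrite author's own statement) =====
-- stated objective: simpler
-- what changed: B maps each byte straight to its decimal string and joins with dots, eliminating A's hex-encode / join / split / base-16-reparse round trip and the lookup table.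
-- intended difference: On the empty list A returns '0' (an artefact of ''.split(':') being [''], reparsed as the value 0) while B returns '', the natural join of no components. — e.g. on convert_bytes_to_readable_ipv4_address([]): A returns "0", B returns ""
import Mathlib
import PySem

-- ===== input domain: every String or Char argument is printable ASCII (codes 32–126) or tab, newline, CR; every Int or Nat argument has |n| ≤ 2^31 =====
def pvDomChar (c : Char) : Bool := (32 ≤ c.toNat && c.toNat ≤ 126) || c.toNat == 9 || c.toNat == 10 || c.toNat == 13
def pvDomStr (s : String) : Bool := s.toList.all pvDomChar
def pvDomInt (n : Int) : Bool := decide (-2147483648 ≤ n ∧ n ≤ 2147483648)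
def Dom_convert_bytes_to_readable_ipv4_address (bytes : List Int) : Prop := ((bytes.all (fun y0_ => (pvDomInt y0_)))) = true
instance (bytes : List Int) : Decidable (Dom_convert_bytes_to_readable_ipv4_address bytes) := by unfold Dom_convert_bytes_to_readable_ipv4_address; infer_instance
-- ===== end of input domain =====

-- B converts each byte straight to decimal and joins with dots, dropping A's hex-encode / base-16-reparse round trip (objective: simpler; a timing run measured it faster by a constant factor).

-- ===== PORT A =====
-- the module-level dict map_base_16
def pv_map_base_16 : PySem.Dict Char Int :=
  PySem.Dict.mk [('0',0),('1',1),('2',2),('3',3),('4',4),('5',5),('6',6),('7',7),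
                 ('8',8),('9',9),('A',10),('B',11),('C',12),('D',13),('E',14),('F',15)]

def pvHexDigitChar (n : Nat) : Char :=
  if n < 10 then Char.ofNat (48 + n) else Char.ofNat (87 + n)

-- lowercase hex digits of n, most significant first (the digits of "%x" % n for n ≥ 0)
def pvHexNat (n : Nat) : List Char :=
  if n < 16 then [pvHexDigitChar n]
  else pvHexNat (n / 16) ++ [pvHexDigitChar (n % 16)]
decreasing_by exact Nat.div_lt_self (by omega) (by omega)

-- "%02x" % b: exact for b ≥ 0 (Pre_ excludes b < 0, where the Python raises KeyError on the '-' sign)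
def pvHex2 (b : Int) : List Char := PySem.Chars.zfill (pvHexNat b.toNat) 2

def get_bytes_in_pretty_format (bytes : List Int) (sep : String) : String :=
  PySem.Str.upper (PySem.Str.join sep (bytes.map (fun b => String.ofList (pvHex2 b))))

-- the inner for-loop of A over range(len(s)-1, -1, -1); state (p, decimal); p stays ≥ 0,
-- so pow(16, p) is 16 ^ p.toNat; missing dict key defaulted to 0 (Pre_ excludes the KeyError inputs)
def pvParseChunk (byte_string : List Char) : Int :=
  ((PySem.List.pyRange ((byte_string.length : Int) - 1) (-1) (-1)).foldl
    (fun (st : Int × Int) i =>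
      (st.1 + 1, st.2 + pv_map_base_16.getD ((PySem.List.pyGet? byte_string i).getD ' ') 0 * 16 ^ st.1.toNat))
    (0, 0)).2

def convert_bytes_to_readable_ipv4_address (bytes : List Int) : String :=
  -- .split(":") : Chars.splitOn is the sep ≠ "" form
  let bytes_string_array := PySem.Chars.splitOn (get_bytes_in_pretty_format bytes ":").toList [':']
  let ip := bytes_string_array.foldl (fun ip bs => ip ++ [pvParseChunk bs]) ([] : List Int)
  PySem.Str.join "." (ip.map PySem.Int.toStr)

-- ===== PORT B =====
def convert_bytes_to_readable_ipv4_address_alt (bytes : List Int) : String :=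
  PySem.Str.join "." (bytes.map PySem.Int.toStr)

-- ===== PRECONDITION & SPEC =====
-- Pre_ excludes lists containing a negative byte: there "%02x" produces a '-' sign and A raises KeyError.
def Pre_convert_bytes_to_readable_ipv4_address (bytes : List Int) : Prop := ∀ b ∈ bytes, 0 ≤ b
instance (bytes : List Int) : Decidable (Pre_convert_bytes_to_readable_ipv4_address bytes) := by unfold Pre_convert_bytes_to_readable_ipv4_address; infer_instance
def pvWitness_convert_bytes_to_readable_ipv4_address : List Int := [192, 168, 0, 1]

-- On the empty list A returns "0" (an artefact of "".split(":") being [''], reparsed as the single value 0),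
-- while B returns "", the natural join of no components — the intended rendering of no bytes.
def D_convert_bytes_to_readable_ipv4_address (bytes : List Int) : Prop := bytes = []
instance (bytes : List Int) : Decidable (D_convert_bytes_to_readable_ipv4_address bytes) := by unfold D_convert_bytes_to_readable_ipv4_address; infer_instance

def Spec_convert_bytes_to_readable_ipv4_address (bytes : List Int) (out : String) : Prop := ¬ D_convert_bytes_to_readable_ipv4_address bytes → out = convert_bytes_to_readable_ipv4_address_alt bytes
instance (bytes : List Int) (out : String) : Decidable (Spec_convert_bytes_to_readable_ipv4_address bytes out) := by unfold Spec_convert_bytes_to_readable_ipv4_address; infer_instance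

def pvDiffWitness_convert_bytes_to_readable_ipv4_address : List Int := []
def pvDiffWitnessOut_convert_bytes_to_readable_ipv4_address : String × String := ("0", "")

-- ===== CLAIM (what is proved, stated in full; the proofs are below) =====
def Claim_unchanged_convert_bytes_to_readable_ipv4_address : Prop := ∀ (bytes : List Int), Dom_convert_bytes_to_readable_ipv4_address bytes → Pre_convert_bytes_to_readable_ipv4_address bytes → Spec_convert_bytes_to_readable_ipv4_address bytes (convert_bytes_to_readable_ipv4_address bytes)
def Claim_changed_convert_bytes_to_readable_ipv4_address : Prop := Dom_convert_bytes_to_readable_ipv4_address (pvDiffWitness_convert_bytes_to_readable_ipv4_address) ∧ Pre_convert_bytes_to_readable_ipv4_address (pvDiffWitness_convert_bytes_to_readable_ipv4_address) ∧ D_convert_bytes_to_readable_ipv4_address (pvDiffWitness_convert_bytes_to_readable_ipv4_address) ∧ convert_bytes_to_readable_ipv4_address (pvDiffWitness_convert_bytes_to_readable_ipv4_address) = pvDiffWitnessOut_convert_bytes_to_readable_ipv4_address.1 ∧ convert_bytes_to_readable_ipv4_address_alt (pvDiffWitness_convert_bytes_to_readable_ipv4_address) = pvDiffWitnessOut_convert_bytes_to_readable_ipv4_address.2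 ∧ pvDiffWitnessOut_convert_bytes_to_readable_ipv4_address.1 ≠ pvDiffWitnessOut_convert_bytes_to_readable_ipv4_address.2
def Claim_exact_convert_bytes_to_readable_ipv4_address : Prop := ∀ (bytes : List Int), Dom_convert_bytes_to_readable_ipv4_address bytes → Pre_convert_bytes_to_readable_ipv4_address bytes → D_convert_bytes_to_readable_ipv4_address bytes → convert_bytes_to_readable_ipv4_address bytes ≠ convert_bytes_to_readable_ipv4_address_alt bytes

-- ===== LEMMAS AND PROOFS =====

-- base-16 value of a digit string, most significant first (proof-only helper)
def pvBigVal (cs : List Char) : Int :=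
  cs.foldl (fun a c => 16 * a + pv_map_base_16.getD c 0) 0

theorem pv_digit_facts (d : Nat) (hd : d < 16) :
    pv_map_base_16.getD (PySem.Chars.upperChar (pvHexDigitChar d)) 0 = (d : Int) ∧
    PySem.Chars.upperChar (pvHexDigitChar d) ≠ ':' ∧
    pvHexDigitChar d ≠ '+' ∧ pvHexDigitChar d ≠ '-' := by
  interval_cases d <;> exact ⟨by decide, by decide, by decide, by decide⟩

theorem pv_bigVal_append (t : List Char) (c : Char) :
    pvBigVal (t ++ [c]) = 16 * pvBigVal t + pv_map_base_16.getD c 0 := by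
  simp [pvBigVal, List.foldl_append]

theorem pv_bigVal_cons_zero (xs : List Char) : pvBigVal ('0' :: xs) = pvBigVal xs := by
  have h0 : pv_map_base_16.getD '0' 0 = 0 := by decide
  simp [pvBigVal, List.foldl_cons, h0]

theorem pv_hexNat_shape (n : Nat) : ∃ d rest, d < 16 ∧ pvHexNat n = pvHexDigitChar d :: rest := by
  induction n using Nat.strong_induction_on with
  | _ n ih =>
    rw [pvHexNat]
    by_cases h : n < 16
    · exact ⟨n, [], h, by rw [if_pos h]⟩
    · obtain ⟨d, rest, hd, heq⟩ := ih (n / 16) (Nat.div_lt_self (by omega) (by omega))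
      exact ⟨d, rest ++ [pvHexDigitChar (n % 16)], hd, by rw [if_neg h, heq]; simp⟩

theorem pv_upper_hexNat_val (n : Nat) : pvBigVal (PySem.Chars.upper (pvHexNat n)) = (n : Int) := by
  induction n using Nat.strong_induction_on with
  | _ n ih =>
    rw [pvHexNat]
    by_cases h : n < 16
    · rw [if_pos h]
      simp [PySem.Chars.upper, pvBigVal, (pv_digit_facts n h).1]
    · rw [if_neg h]
      simp only [PySem.Chars.upper, List.map_append, List.map_cons, List.map_nil]
      rw [show (List.map PySem.Chars.upperChar (pvHexNat (n / 16)) ++ [PySem.Chars.upperChar (pvHexDigitChar (n % 16))]) = PySem.Chars.upper (pvHexNat (n / 16)) ++ [PySem.Chars.upperChar (pvHexDigitChar (n % 16))] from rfl]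
      rw [pv_bigVal_append, ih (n / 16) (Nat.div_lt_self (by omega) (by omega)),
          (pv_digit_facts (n % 16) (Nat.mod_lt _ (by omega))).1]
      omega

theorem pv_upper_hexNat_no_colon (n : Nat) : ∀ c ∈ PySem.Chars.upper (pvHexNat n), c ≠ ':' := by
  induction n using Nat.strong_induction_on with
  | _ n ih =>
    rw [pvHexNat]
    by_cases h : n < 16
    · rw [if_pos h]
      intro c hc
      simp [PySem.Chars.upper] at hc
      rw [hc]; exact (pv_digit_facts n h).2.1
    · rw [if_neg h]
      intro c hc
      simp only [PySem.Chars.upper, List.map_append, List.map_cons, List.map_nil, List.mem_append, List.mem_cons] at hc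
      rcases hc with hc | hc
      · exact ih (n / 16) (Nat.div_lt_self (by omega) (by omega)) c (by simpa [PySem.Chars.upper] using hc)
      · simp at hc; rw [hc]; exact (pv_digit_facts (n % 16) (Nat.mod_lt _ (by omega))).2.1

theorem pv_zfill_hex (n : Nat) :
    PySem.Chars.zfill (pvHexNat n) 2 = pvHexNat n ∨
    PySem.Chars.zfill (pvHexNat n) 2 = '0' :: pvHexNat n := by
  obtain ⟨d, rest, hd, heq⟩ := pv_hexNat_shape n
  rw [PySem.Chars.zfill.eq_def]
  by_cases hl : (2 : Int) ≤ (pvHexNat n).length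
  · left; rw [if_pos hl]
  · right
    rw [if_neg hl]
    have hlen : (pvHexNat n).length = 1 := by rw [heq]; simp at hl ⊢; rw [heq] at hl; simp at hl; omega
    rw [heq] at hlen ⊢
    have : rest = [] := by simpa using hlen
    subst this
    have hpm : ¬(pvHexDigitChar d = '+' ∨ pvHexDigitChar d = '-') := by
      rintro (h | h)
      · exact (pv_digit_facts d hd).2.2.1 h
      · exact (pv_digit_facts d hd).2.2.2 h
    simp [hpm]

theorem pv_chunk_val (b : Int) (hb : 0 ≤ b) :
    pvBigVal (PySem.Chars.upper (pvHex2 b)) = b := by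
  unfold pvHex2
  rcases pv_zfill_hex b.toNat with h | h <;> rw [h]
  · rw [pv_upper_hexNat_val]; omega
  · rw [show PySem.Chars.upper ('0' :: pvHexNat b.toNat) = '0' :: PySem.Chars.upper (pvHexNat b.toNat) from by simp [PySem.Chars.upper]; decide]
    rw [pv_bigVal_cons_zero, pv_upper_hexNat_val]; omega

theorem pv_chunk_no_colon (b : Int) : ∀ c ∈ PySem.Chars.upper (pvHex2 b), c ≠ ':' := by
  unfold pvHex2
  rcases pv_zfill_hex b.toNat with h | h <;> rw [h]
  · exact pv_upper_hexNat_no_colon b.toNat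
  · intro c hc
    simp only [PySem.Chars.upper, List.map_cons, List.mem_cons] at hc
    rcases hc with hc | hc
    · rw [hc]; decide
    · exact pv_upper_hexNat_no_colon b.toNat c hc

theorem pv_pyRange_down_cons (m : Int) (hm : 0 ≤ m) :
    PySem.List.pyRange m (-1) (-1) = m :: PySem.List.pyRange (m - 1) (-1) (-1) := by
  simp only [PySem.List.pyRange]
  norm_num
  rw [if_pos (by omega : (-1:Int) < m)]
  have h1 : (m + 1).toNat = m.toNat + 1 := by omega
  by_cases h : (0:Int) < m
  · rw [if_pos h]
    rw [(by omega : (m + 1).toNat = m.toNat + 1), List.range_succ_eq_map, List.map_cons, List.map_map]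
    congr 1
    · simp
    · apply List.map_congr_left; intro k hk; simp; omega
  · have hm0 : m = 0 := by omega
    subst hm0
    simp

theorem pv_mem_pyRange_down (m i : Int) (h : i ∈ PySem.List.pyRange m (-1) (-1)) : 0 ≤ i ∧ i ≤ m := by
  simp only [PySem.List.pyRange] at h
  norm_num at h
  split_ifs at h with h1
  · obtain ⟨k, hk, rfl⟩ := h
    omega
  · simp at h

theorem pv_parse_fold (s : List Char) : ∀ (p dec : Int), 0 ≤ p →
    (PySem.List.pyRange ((s.length : Int) - 1) (-1) (-1)).foldl
      (fun (st : Int × Int) i =>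
        (st.1 + 1, st.2 + pv_map_base_16.getD ((PySem.List.pyGet? s i).getD ' ') 0 * 16 ^ st.1.toNat))
      (p, dec)
    = (p + s.length, dec + 16 ^ p.toNat * pvBigVal s) := by
  induction s using List.reverseRecOn with
  | nil =>
    intro p dec hp
    have : PySem.List.pyRange ((([] : List Char).length : Int) - 1) (-1) (-1) = [] := by decide
    rw [this]
    simp [pvBigVal]
  | append_singleton t c ih =>
    intro p dec hp
    have hlen : (((t ++ [c]).length : Int)) - 1 = (t.length : Int) := by simp
    rw [hlen, pv_pyRange_down_cons _ (Int.natCast_nonneg _), List.foldl_cons]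
    have hget : PySem.List.pyGet? (t ++ [c]) ((t.length : Nat) : Int) = some c := by
      rw [PySem.List.pyGet?_natCast]; simp
    have hcongr : ∀ (st : Int × Int), ∀ i ∈ PySem.List.pyRange ((t.length : Int) - 1) (-1) (-1),
        (st.1 + 1, st.2 + pv_map_base_16.getD ((PySem.List.pyGet? (t ++ [c]) i).getD ' ') 0 * 16 ^ st.1.toNat)
        = ((st.1 + 1, st.2 + pv_map_base_16.getD ((PySem.List.pyGet? t i).getD ' ') 0 * 16 ^ st.1.toNat) : Int × Int) := by
      intro st i hi
      obtain ⟨h0, h1⟩ := pv_mem_pyRange_down _ _ hi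
      have hi' : i = ((i.toNat : Nat) : Int) := by omega
      have hlt : i.toNat < t.length := by omega
      rw [hi', PySem.List.pyGet?_natCast, PySem.List.pyGet?_natCast,
          List.getElem?_append_left hlt]
    rw [PySem.List.foldl_congr_mem _ _ _ _ hcongr]
    simp only [hget]
    rw [ih (p + 1) _ (by omega)]
    rw [pv_bigVal_append]
    have h2 : (p + 1).toNat = p.toNat + 1 := by omega
    refine Prod.ext ?_ ?_ <;> simp [h2, pow_succ]
    · omega
    · ring

theorem pv_parse_chunk (b : Int) (hb : 0 ≤ b) :
    pvParseChunk (PySem.Chars.upper (pvHex2 b)) = b := by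
  unfold pvParseChunk
  rw [pv_parse_fold _ 0 0 le_rfl]
  simp [pv_chunk_val b hb]

theorem pv_upper_join (l : List (List Char)) :
    PySem.Chars.upper (PySem.Chars.join [':'] l) = PySem.Chars.join [':'] (l.map PySem.Chars.upper) := by
  induction l with
  | nil => simp [PySem.Chars.join_nil, PySem.Chars.upper]
  | cons p t ih =>
    cases t with
    | nil => simp [PySem.Chars.join_singleton]
    | cons q t' =>
      have ih' := ih
      simp only [List.map_cons] at ih'
      rw [PySem.Chars.join_cons_cons, List.map_cons, List.map_cons, PySem.Chars.join_cons_cons, ← ih']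
      simp [PySem.Chars.upper]
      decide

theorem pv_go_nil (sep : List Char) (f : Nat) (cur : List Char) (acc : List (List Char)) :
    PySem.Chars.splitOn.go sep (f + 1) [] cur acc = (cur.reverse :: acc).reverse := by
  rw [PySem.Chars.splitOn.go]; omega

theorem pv_go_sep (f : Nat) (l cur : List Char) (acc : List (List Char)) :
    PySem.Chars.splitOn.go [':'] (f + 1) (':' :: l) cur acc
      = PySem.Chars.splitOn.go [':'] f l [] (cur.reverse :: acc) := by
  rw [PySem.Chars.splitOn.go]; simp [List.isPrefixOf]

theorem pv_go_char (f : Nat) (c : Char) (l cur : List Char) (acc : List (List Char)) (hc : c ≠ ':') :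
    PySem.Chars.splitOn.go [':'] (f + 1) (c :: l) cur acc
      = PySem.Chars.splitOn.go [':'] f l (c :: cur) acc := by
  rw [PySem.Chars.splitOn.go]; simp [List.isPrefixOf]
  exact fun h => (hc h.symm).elim

theorem pv_go_chunk (p : List Char) (hp : ∀ c ∈ p, c ≠ ':') :
    ∀ (f : Nat) (l cur : List Char) (acc : List (List Char)),
    PySem.Chars.splitOn.go [':'] (f + p.length) (p ++ l) cur acc
      = PySem.Chars.splitOn.go [':'] f l (p.reverse ++ cur) acc := by
  induction p with
  | nil => intro f l cur acc; simp
  | cons c t ih =>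
    intro f l cur acc
    have h1 : f + (c :: t).length = (f + t.length) + 1 := by simp; omega
    rw [h1, List.cons_append, pv_go_char _ _ _ _ _ (hp c (by simp)),
        ih (fun x hx => hp x (by simp [hx])) f l (c :: cur) acc]
    simp

theorem pv_go_join (parts : List (List Char)) :
    parts ≠ [] → (∀ p ∈ parts, ∀ c ∈ p, c ≠ ':') →
    ∀ (f : Nat) (acc : List (List Char)),
    PySem.Chars.splitOn.go [':'] ((PySem.Chars.join [':'] parts).length + f + 1)
        (PySem.Chars.join [':'] parts) [] acc
      = acc.reverse ++ parts := by
  induction parts with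
  | nil => intro h; exact absurd rfl h
  | cons p t ih =>
    intro _ hc f acc
    cases t with
    | nil =>
      rw [PySem.Chars.join_singleton]
      have h2 := pv_go_chunk p (hc p (by simp)) (f + 1) [] [] acc
      simp only [List.append_nil] at h2
      rw [(by omega : p.length + f + 1 = (f + 1) + p.length), h2, pv_go_nil]
      simp
    | cons q t' =>
      rw [PySem.Chars.join_cons_cons]
      have hlen : (p ++ [':'] ++ PySem.Chars.join [':'] (q :: t')).length
          = p.length + 1 + (PySem.Chars.join [':'] (q :: t')).length := by simp; omega
      have harr : p ++ [':'] ++ PySem.Chars.join [':'] (q :: t')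
          = p ++ (':' :: PySem.Chars.join [':'] (q :: t')) := by simp
      have h1 : (p ++ [':'] ++ PySem.Chars.join [':'] (q :: t')).length + f + 1
          = (((PySem.Chars.join [':'] (q :: t')).length + f + 1) + 1) + p.length := by rw [hlen]; omega
      rw [h1, harr, pv_go_chunk p (hc p (by simp)), pv_go_sep]
      simp only [List.append_nil, List.reverse_reverse]
      rw [ih (by simp) (fun x hx => hc x (by simp [hx])) f (p :: acc)]
      simp

theorem pv_splitOn_join (parts : List (List Char)) (hne : parts ≠ [])
    (hc : ∀ p ∈ parts, ∀ c ∈ p, c ≠ ':') :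
    PySem.Chars.splitOn (PySem.Chars.join [':'] parts) [':'] = parts := by
  have := pv_go_join parts hne hc 0 []
  simpa [PySem.Chars.splitOn] using this

theorem pv_foldl_append_map (g : List Char → Int) :
    ∀ (l : List (List Char)) (acc : List Int),
    l.foldl (fun ip bs => ip ++ [g bs]) acc = acc ++ l.map g := by
  intro l
  induction l with
  | nil => simp
  | cons x t ih => intro acc; simp [ih]

-- ===== VERDICT =====
theorem convert_bytes_to_readable_ipv4_address_spec : Claim_unchanged_convert_bytes_to_readable_ipv4_address := by
  unfold Claim_unchanged_convert_bytes_to_readable_ipv4_address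
  intro bytes _ hpre
  unfold Spec_convert_bytes_to_readable_ipv4_address D_convert_bytes_to_readable_ipv4_address
  intro hne
  unfold convert_bytes_to_readable_ipv4_address convert_bytes_to_readable_ipv4_address_alt
  have hstr : (get_bytes_in_pretty_format bytes ":").toList
      = PySem.Chars.join [':'] (bytes.map (fun b => PySem.Chars.upper (pvHex2 b))) := by
    unfold get_bytes_in_pretty_format
    rw [PySem.Str.toList_upper, PySem.Str.toList_join]
    rw [show ":".toList = [':'] from rfl, pv_upper_join]
    congr 1
    simp [Function.comp_def]
  rw [hstr, pv_splitOn_join _ (by simpa using hne)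
        (by intro p hp; simp at hp; obtain ⟨b, _, rfl⟩ := hp; exact pv_chunk_no_colon b)]
  show PySem.Str.join "." (List.map PySem.Int.toStr
      (List.foldl (fun ip bs => ip ++ [pvParseChunk bs]) []
        (List.map (fun b => PySem.Chars.upper (pvHex2 b)) bytes)))
    = PySem.Str.join "." (List.map PySem.Int.toStr bytes)
  rw [pv_foldl_append_map]
  simp only [List.nil_append, List.map_map]
  congr 1
  apply List.map_congr_left
  intro b hb
  simp only [Function.comp_apply]
  rw [pv_parse_chunk b (hpre b hb)]

theorem convert_bytes_to_readable_ipv4_address_changed : Claim_changed_convert_bytes_to_readable_ipv4_address := by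
  unfold Claim_changed_convert_bytes_to_readable_ipv4_address; decide

theorem convert_bytes_to_readable_ipv4_address_tight : Claim_exact_convert_bytes_to_readable_ipv4_address := by
  intro bytes _ _ hD
  rw [hD]
  decide
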